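-- pv_equiv track=rewrite | github.com/esmilc/TIP101_TF_Spr25 | Unit_3/Session2_SumUniqueElements.py | sum_of_unique_elements
-- ===== SOURCE A (Python) =====
-- def sum_of_unique_elements(lst1, lst2):
--     set2 = set(lst2)
--     freq1 = {}
--
--     for elem in lst1:
--         freq1[elem] = freq1.get(elem, 0) + 1
--
--     sum = 0
--
--     for num in lst1:
--         if freq1[num] == 1 and num not in set2:
--             sum += num
--     return sum
-- ===== SOURCE B (Python) =====
-- def sum_of_unique_elements(lst1, lst2):
--     # Sort lst1 so duplicates become adjacent; one run-length scan over the
--     # sorted list adds each element whose run has length 1 and that is not in lst2.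
--     excluded = set(lst2)
--     total = 0
--     run_val = None
--     run_len = 0
--     for x in sorted(lst1):
--         if run_len > 0 and x == run_val:
--             run_len += 1
--         else:
--             if run_len == 1 and run_val not in excluded:
--                 total += run_val
--             run_val = x
--             run_len = 1
--     if run_len == 1 and run_val not in excluded:
--         total += run_val
--     return total
-- ===== Notes on version B (the rewrite author's own statement) =====
-- stated objective: alternative
-- what changed: B replaces A's frequency dictionary and second scan of lst1 by sort-then-run-length-scan: it sorts lst1 so equal elements are adjacent and sums every run of length exactly 1 whose value is not in set(lst2); order of summation differs but integer addition is commutative.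
import Mathlib
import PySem

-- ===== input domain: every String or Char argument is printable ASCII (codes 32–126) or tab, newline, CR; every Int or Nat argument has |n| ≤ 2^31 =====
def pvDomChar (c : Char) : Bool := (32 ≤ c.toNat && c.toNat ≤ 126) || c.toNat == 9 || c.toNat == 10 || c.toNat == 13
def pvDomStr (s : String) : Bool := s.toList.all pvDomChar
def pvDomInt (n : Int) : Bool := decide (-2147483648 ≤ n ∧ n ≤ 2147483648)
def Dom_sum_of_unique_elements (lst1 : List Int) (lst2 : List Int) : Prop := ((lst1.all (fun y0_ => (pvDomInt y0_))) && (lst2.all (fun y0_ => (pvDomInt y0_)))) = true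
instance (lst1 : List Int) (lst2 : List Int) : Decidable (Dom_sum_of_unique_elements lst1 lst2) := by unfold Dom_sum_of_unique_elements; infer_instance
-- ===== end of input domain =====

-- B replaces A's frequency dictionary + second scan of lst1 by sort-then-run-length-scan
-- (an alternative algorithm, not claimed faster).

-- ===== PORT A =====
def sum_of_unique_elements (lst1 : List Int) (lst2 : List Int) : Int :=
  let set2 := PySem.Set.ofList lst2
  let freq1 := lst1.foldl (fun d e => d.insert e (d.getD e 0 + 1)) (PySem.Dict.empty : PySem.Dict Int Int)
  lst1.foldl (fun s num =>
    if freq1.getD num 0 = 1 ∧ PySem.Set.contains set2 num = false then s + num else s) 0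

-- ===== PORT B =====
-- close a run: add run_val to total if its run had length exactly 1 and it is not excluded
def pvFlush (ex : PySem.Set Int) (st : Int × Option Int × Nat) : Int :=
  if st.2.2 = 1 then
    match st.2.1 with
    | some v => if PySem.Set.contains ex v then st.1 else st.1 + v
    | none => st.1
  else st.1

def pvStep (ex : PySem.Set Int) (st : Int × Option Int × Nat) (x : Int) : Int × Option Int × Nat :=
  if 0 < st.2.2 ∧ st.2.1 = some x then (st.1, st.2.1, st.2.2 + 1)
  else (pvFlush ex st, some x, 1)

def sum_of_unique_elements_alt (lst1 : List Int) (lst2 : List Int) : Int :=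
  let excluded := PySem.Set.ofList lst2
  pvFlush excluded
    ((PySem.List.sorted lst1 (fun x => x) false).foldl (pvStep excluded)
      ((0 : Int), (none : Option Int), (0 : Nat)))

-- ===== PRECONDITION & SPEC =====
def Spec_sum_of_unique_elements (lst1 : List Int) (lst2 : List Int) (out : Int) : Prop := out = sum_of_unique_elements_alt lst1 lst2
instance (lst1 : List Int) (lst2 : List Int) (out : Int) : Decidable (Spec_sum_of_unique_elements lst1 lst2 out) := by unfold Spec_sum_of_unique_elements; infer_instance

-- ===== CLAIM (what is proved, stated in full; the proofs are below) =====
def Claim_equal_sum_of_unique_elements : Prop := ∀ (lst1 : List Int) (lst2 : List Int), Dom_sum_of_unique_elements lst1 lst2 → Spec_sum_of_unique_elements lst1 lst2 (sum_of_unique_elements lst1 lst2)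

-- ===== LEMMAS AND PROOFS =====

-- the value both programs compute: sum, over L, of elements with count 1 in L and not in ex
def padSum (ex : PySem.Set Int) (L : List Int) : Int :=
  (L.map (fun x => if L.count x = 1 ∧ PySem.Set.contains ex x = false then x else 0)).sum

-- A's conditional-sum fold is a sum of a 0-padded map
theorem condsum_eq (l : List Int) (q : Int → Prop) [DecidablePred q] (a : Int) :
    l.foldl (fun s x => if q x then s + x else s) a
      = a + (l.map (fun x => if q x then x else 0)).sum := by
  induction l generalizing a with
  | nil => simp
  | cons x xs ih =>
    simp only [List.foldl_cons, List.map_cons, List.sum_cons, ih]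
    split <;> ring

-- B's run-length scan, started inside a run of k ≥ 1 copies of v, computes padSum of the
-- remaining multiset, provided the tail is sorted and ≥ v
theorem run_spec (ex : PySem.Set Int) (s : List Int) (hs : s.Pairwise (· ≤ ·)) :
    ∀ (v t : Int) (k : Nat), 1 ≤ k → (∀ y ∈ s, v ≤ y) →
      pvFlush ex (s.foldl (pvStep ex) (t, some v, k))
        = t + padSum ex (List.replicate k v ++ s) := by
  induction s with
  | nil =>
    intro v t k hk _
    simp only [List.foldl_nil, List.append_nil, padSum, pvFlush, List.map_replicate,
      List.sum_replicate, List.count_replicate]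
    by_cases h1 : k = 1
    · subst h1
      by_cases hc : v ∈ ex <;> simp [hc]
    · simp [h1]
  | cons x s ih =>
    intro v t k hk hv
    have hxle : ∀ y ∈ s, x ≤ y := (List.pairwise_cons.mp hs).1
    have hs' := (List.pairwise_cons.mp hs).2
    by_cases hvx : v = x
    · -- run continues
      subst hvx
      have hstep : pvStep ex (t, some v, k) v = (t, some v, k + 1) := by
        simp [pvStep, Nat.lt_of_lt_of_le Nat.zero_lt_one hk]
      rw [List.foldl_cons, hstep, ih hs' v t (k + 1) (by omega) hxle]
      have : List.replicate (k + 1) v ++ s = List.replicate k v ++ (v :: s) := by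
        rw [List.replicate_succ']; simp
      rw [this]
    · -- new run starts at x
      have hvltx : v < x := lt_of_le_of_ne (hv x (by simp)) hvx
      have hstep : pvStep ex (t, some v, k) x = (pvFlush ex (t, some v, k), some x, 1) := by
        simp [pvStep, hvx]
      rw [List.foldl_cons, hstep,
        ih hs' x (pvFlush ex (t, some v, k)) 1 le_rfl hxle]
      have hnotmem : v ∉ x :: s := by
        simp only [List.mem_cons]
        push Not
        refine ⟨hvx, fun hm => ?_⟩
        exact absurd (hxle v hm) (not_le.mpr hvltx)
      -- count facts in L = replicate k v ++ x :: s
      have hcv : (List.replicate k v ++ x :: s).count v = k := by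
        rw [List.count_append, List.count_replicate, List.count_eq_zero_of_not_mem hnotmem]
        simp
      have hcy : ∀ y ∈ x :: s, (List.replicate k v ++ x :: s).count y = (x :: s).count y := by
        intro y hy
        have hyne : v ≠ y := by
          intro h; exact hnotmem (h ▸ hy)
        rw [List.count_append, List.count_replicate]
        simp [hyne]
      have hsplit : padSum ex (List.replicate k v ++ x :: s)
          = (if k = 1 ∧ PySem.Set.contains ex v = false then (v : Int) else 0)
            + padSum ex (x :: s) := by
        unfold padSum
        rw [List.map_append, List.sum_append, List.map_replicate, List.sum_replicate, hcv]
        have h2 : ((x :: s).map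
            (fun y => if (List.replicate k v ++ x :: s).count y = 1 ∧
              PySem.Set.contains ex y = false then y else 0))
            = (x :: s).map
            (fun y => if (x :: s).count y = 1 ∧ PySem.Set.contains ex y = false then y else 0) := by
          apply List.map_congr_left
          intro y hy
          rw [hcy y hy]
        rw [h2]
        congr 1
        by_cases h1 : k = 1
        · subst h1; simp
        · simp [h1]
      rw [hsplit, pvFlush]
      by_cases hc : v ∈ ex <;> by_cases h1 : k = 1 <;>
        simp [h1, hc] <;> ring

-- padSum is invariant under permutation
theorem padSum_perm (ex : PySem.Set Int) (L L' : List Int) (hp : L.Perm L') :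
    padSum ex L = padSum ex L' := by
  unfold padSum
  have hc : ∀ x, L.count x = L'.count x := fun x => hp.count_eq x
  calc (L.map (fun x => if L.count x = 1 ∧ PySem.Set.contains ex x = false then x else 0)).sum
      = (L.map (fun x => if L'.count x = 1 ∧ PySem.Set.contains ex x = false then x else 0)).sum := by
        simp only [hc]
    _ = (L'.map (fun x => if L'.count x = 1 ∧ PySem.Set.contains ex x = false then x else 0)).sum :=
        (hp.map _).sum_eq

-- ===== VERDICT (by name: the statement is the Claim_ definition above) =====
theorem sum_of_unique_elements_spec : Claim_equal_sum_of_unique_elements := by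
  intro lst1 lst2 _
  unfold Spec_sum_of_unique_elements sum_of_unique_elements sum_of_unique_elements_alt
  simp only [PySem.Dict.foldl_insert_getD_add_one_eq_counter, PySem.Dict.getD_counter]
  rw [condsum_eq lst1
    (fun x => (lst1.count x : Int) = 1 ∧ PySem.Set.contains (PySem.Set.ofList lst2) x = false)]
  have hA : ((lst1.map (fun x => if (lst1.count x : Int) = 1 ∧
      PySem.Set.contains (PySem.Set.ofList lst2) x = false then x else 0))).sum
      = padSum (PySem.Set.ofList lst2) lst1 := by
    unfold padSum
    congr 1
    apply List.map_congr_left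
    intro x _
    congr 1
    simp [Nat.cast_eq_one]
  rw [zero_add, hA]
  -- B side
  cases hsorted : PySem.List.sorted lst1 (fun x => x) false with
  | nil =>
    have hp : lst1.Perm ([] : List Int) := by
      have := PySem.List.sorted_perm (xs := lst1) (key := fun x => x) (rev := false)
      rw [hsorted] at this
      exact this.symm
    have : lst1 = [] := hp.eq_nil
    subst this
    simp [padSum, pvFlush]
  | cons m ts =>
    have hpair : (m :: ts).Pairwise (· ≤ ·) := by
      have := PySem.List.sorted_pairwise (xs := lst1) (key := fun x => x)
      rw [hsorted] at this
      exact this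
    have hperm : (m :: ts).Perm lst1 := by
      have := PySem.List.sorted_perm (xs := lst1) (key := fun x => x) (rev := false)
      rw [hsorted] at this
      exact this
    have hstep0 : pvStep (PySem.Set.ofList lst2) ((0 : Int), (none : Option Int), (0 : Nat)) m
        = ((0 : Int), some m, 1) := by
      simp [pvStep, pvFlush]
    rw [List.foldl_cons, hstep0,
      run_spec (PySem.Set.ofList lst2) ts (List.pairwise_cons.mp hpair).2 m 0 1 le_rfl
        (List.pairwise_cons.mp hpair).1]
    rw [zero_add]
    have : List.replicate 1 m ++ ts = m :: ts := by simp
    rw [this]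
    exact padSum_perm _ _ _ hperm.symm
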